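-- pv_equiv track=rewrite | github.com/sicotteh/CAVA | cava/utils/indelnormalize.py | trimCommonEnd
-- ===== SOURCE A (Python) =====
-- def trimCommonEnd(s1, s2):
--     counter = 0
--     while True:
--         if len(s1) == 0 or len(s2) == 0:
--             return counter, s1, s2
--         if s1[-1] != s2[-1]:
--             return counter, s1, s2
--         s1, s2 = s1[:-1], s2[:-1]
--         counter += 1
-- ===== SOURCE B (Python) =====
-- def trimCommonEnd(s1, s2):
--     k = 0
--     for a, b in zip(reversed(s1), reversed(s2)):
--         if a != b:
--             break
--         k += 1
--     return k, s1[:len(s1) - k], s2[:len(s2) - k]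
-- ===== Notes on version B (the rewrite author's own statement) =====
-- stated objective: faster
-- what changed: Instead of repeatedly slicing both strings one character at a time (quadratic copying), B finds the common-suffix length in one backward scan and slices each string once.
import Mathlib
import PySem

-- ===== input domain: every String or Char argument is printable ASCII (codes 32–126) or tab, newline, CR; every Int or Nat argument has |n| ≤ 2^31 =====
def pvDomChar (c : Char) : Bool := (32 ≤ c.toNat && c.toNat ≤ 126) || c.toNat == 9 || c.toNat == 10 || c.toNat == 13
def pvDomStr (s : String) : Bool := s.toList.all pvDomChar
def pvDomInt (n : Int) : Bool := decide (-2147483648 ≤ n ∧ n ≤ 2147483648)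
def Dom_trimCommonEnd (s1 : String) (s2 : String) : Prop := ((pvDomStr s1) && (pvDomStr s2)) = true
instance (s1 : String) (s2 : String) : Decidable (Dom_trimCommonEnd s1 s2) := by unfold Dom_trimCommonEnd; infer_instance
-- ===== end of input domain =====

-- B replaces A's repeated one-character slicing (quadratic copying when the common suffix is long)
-- with a single backward scan for the common-suffix length followed by one slice per string.


-- ===== PORT A =====
-- A's while-loop as structural recursion on the loop state (counter, s1, s2), over List Char;
-- s[-1] is `getLast?` and s[:-1] is `dropLast`, exact for any string.
def pvTrimLoopA (counter : Int) (l1 l2 : List Char) : Int × String × String :=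
  if h : l1.length = 0 ∨ l2.length = 0 then (counter, String.ofList l1, String.ofList l2)
  else if l1.getLast? ≠ l2.getLast? then (counter, String.ofList l1, String.ofList l2)
  else pvTrimLoopA (counter + 1) l1.dropLast l2.dropLast
termination_by l1.length
decreasing_by
  simp only [List.length_dropLast]; omega

def trimCommonEnd (s1 : String) (s2 : String) : Int × String × String :=
  pvTrimLoopA 0 s1.toList s2.toList

-- ===== PORT B =====
-- the `for a, b in zip(reversed(s1), reversed(s2))` counting loop of Source B
def pvCommonPrefixLen : List Char → List Char → Nat
  | a :: xs, b :: ys => if a = b then pvCommonPrefixLen xs ys + 1 else 0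
  | _, _ => 0

def trimCommonEnd_alt (s1 : String) (s2 : String) : Int × String × String :=
  let l1 := s1.toList
  let l2 := s2.toList
  let k := pvCommonPrefixLen l1.reverse l2.reverse
  ((k : Int), String.ofList (l1.take (l1.length - k)), String.ofList (l2.take (l2.length - k)))

-- ===== PRECONDITION & SPEC =====
def Spec_trimCommonEnd (s1 : String) (s2 : String) (out : Int × String × String) : Prop := out = trimCommonEnd_alt s1 s2
instance (s1 : String) (s2 : String) (out : Int × String × String) : Decidable (Spec_trimCommonEnd s1 s2 out) := by unfold Spec_trimCommonEnd; infer_instance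

-- ===== CLAIM (what is proved, stated in full; the proofs are below) =====
def Claim_equal_trimCommonEnd : Prop := ∀ (s1 : String) (s2 : String), Dom_trimCommonEnd s1 s2 → Spec_trimCommonEnd s1 s2 (trimCommonEnd s1 s2)

-- ===== LEMMAS AND PROOFS =====
lemma pvLoopA_eq (r1 : List Char) : ∀ (r2 : List Char) (c : Int),
    pvTrimLoopA c r1.reverse r2.reverse =
      (c + (pvCommonPrefixLen r1 r2 : Int),
       String.ofList (r1.drop (pvCommonPrefixLen r1 r2)).reverse,
       String.ofList (r2.drop (pvCommonPrefixLen r1 r2)).reverse) := by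
  induction r1 with
  | nil =>
    intro r2 c
    rw [pvTrimLoopA]
    simp [pvCommonPrefixLen]
  | cons x xs ih =>
    intro r2 c
    cases r2 with
    | nil =>
      rw [pvTrimLoopA]
      simp [pvCommonPrefixLen]
    | cons y ys =>
      rw [pvTrimLoopA]
      by_cases hxy : x = y
      · subst hxy
        have h1 : (x :: xs).reverse.dropLast = xs.reverse := by
          simp [List.reverse_cons]
        have h2 : (x :: ys).reverse.dropLast = ys.reverse := by
          simp [List.reverse_cons]
        simp only [List.length_reverse, List.length_cons, List.getLast?_reverse,
          List.head?_cons, h1, h2]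
        rw [dif_neg (by omega)]
        rw [ih ys (c + 1)]
        simp [pvCommonPrefixLen]
        ring
      · simp only [List.length_reverse, List.length_cons, List.getLast?_reverse,
          List.head?_cons]
        rw [dif_neg (by omega), if_pos (by simp [hxy])]
        simp [pvCommonPrefixLen, hxy]

lemma pvDropRev (l : List Char) (k : Nat) :
    (l.reverse.drop k).reverse = l.take (l.length - k) := by
  rw [List.drop_reverse, List.reverse_reverse]

-- ===== VERDICT (by name: the statement is the Claim_ definition above) =====
theorem trimCommonEnd_spec : Claim_equal_trimCommonEnd := by
  intro s1 s2 _
  unfold Spec_trimCommonEnd trimCommonEnd trimCommonEnd_alt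
  have h := pvLoopA_eq s1.toList.reverse s2.toList.reverse 0
  simp only [List.reverse_reverse] at h
  rw [h]
  simp [pvDropRev]
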